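-- pv_equiv track=rewrite | github.com/ik48655/Introduction-to-programming | Drugi kolokvij, prvi rok 2017/F 2.py | dvasugl
-- ===== SOURCE A (Python) =====
-- def dvasugl(string1):
--     samoglasnici=["a","e","i","o","u"]
--     string2=string1[0]
--     skip = False
--     for c in string1[1:]:
--         if c != string2[-1] or c in samoglasnici:
--             string2 += c
--             skip = False
--         elif c == string2[-1] and c not in samoglasnici and not skip:
--             skip = True
--         else:
--             string2 += c
--             skip = False
--     return string2
-- ===== SOURCE B (Python) =====
-- def dvasugl(string1):
--     vowels = "aeiou"
--     out = []
--     i = 0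
--     n = len(string1)
--     while i < n:
--         j = i
--         while j < n and string1[j] == string1[i]:
--             j += 1
--         run = j - i
--         ch = string1[i]
--         out.append(ch * (run if ch in vowels else (run + 1) // 2))
--         i = j
--     return ''.join(out)
-- ===== Notes on version B (the rewrite author's own statement) =====
-- stated objective: alternative
-- what changed: Replaces the per-character skip-toggle state machine with a two-pointer run-length scan: each maximal run of equal characters is emitted whole for vowels and as ceil(n/2) copies for non-vowels.
import Mathlib
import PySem

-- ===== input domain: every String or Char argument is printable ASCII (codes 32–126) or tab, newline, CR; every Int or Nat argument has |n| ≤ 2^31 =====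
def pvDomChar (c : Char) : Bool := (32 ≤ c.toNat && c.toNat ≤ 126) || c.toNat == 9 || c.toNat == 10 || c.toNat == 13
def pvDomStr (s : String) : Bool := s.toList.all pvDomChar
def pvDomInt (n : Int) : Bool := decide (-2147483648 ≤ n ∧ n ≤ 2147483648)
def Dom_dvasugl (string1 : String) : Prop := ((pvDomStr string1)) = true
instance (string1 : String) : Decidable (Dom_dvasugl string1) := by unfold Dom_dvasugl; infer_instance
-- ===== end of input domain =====

-- B replaces A's per-character skip-toggle with a run-length scan (vowel runs kept whole,
-- consonant runs collapsed to ceil(n/2) copies): an alternative decomposition of equal cost.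


-- ===== PORT A =====
-- the vowel list 'samoglasnici'
def pvVowels : List Char := ['a', 'e', 'i', 'o', 'u']

-- one iteration of A's for-loop; string2 is kept REVERSED (append = cons, string2[-1] = head)
def pvStepA (st : List Char × Bool) (c : Char) : List Char × Bool :=
  let s2 := st.1
  let skip := st.2
  if c ≠ s2.headD ' ' ∨ c ∈ pvVowels then (c :: s2, false)
  else if c = s2.headD ' ' ∧ c ∉ pvVowels ∧ skip = false then (s2, true)
  else (c :: s2, false)

def dvasugl (string1 : String) : String :=
  match string1.toList with
  | [] => ""   -- unreachable inside Pre_dvasugl: Python A raises IndexError on string1[0]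
  | h :: t => String.ofList ((t.foldl pvStepA ([h], false)).1.reverse)

-- ===== PORT B =====
-- B's outer while-loop: take the maximal run at the front, emit it (whole for a vowel,
-- ceil(run/2) copies otherwise), continue after the run.
def pvRunGo : List Char → List Char
  | [] => []
  | c :: cs =>
    List.replicate
        (if c ∈ pvVowels then 1 + (cs.takeWhile (· = c)).length
         else (1 + (cs.takeWhile (· = c)).length + 1) / 2) c
      ++ pvRunGo (cs.dropWhile (· = c))
termination_by l => l.length
decreasing_by
  simp only [List.length_cons]
  exact Nat.lt_succ_of_le (List.length_dropWhile_le _ _)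

def dvasugl_alt (string1 : String) : String := String.ofList (pvRunGo string1.toList)

-- ===== PRECONDITION & SPEC =====
-- A raises IndexError on the empty string (it reads string1[0]); that is the only excluded input.
def Pre_dvasugl (string1 : String) : Prop := string1 ≠ ""
instance (string1 : String) : Decidable (Pre_dvasugl string1) := by unfold Pre_dvasugl; infer_instance
def pvWitness_dvasugl : String := "hello"

def Spec_dvasugl (string1 : String) (out : String) : Prop := out = dvasugl_alt string1
instance (string1 : String) (out : String) : Decidable (Spec_dvasugl string1 out) := by unfold Spec_dvasugl; infer_instance

-- ===== CLAIM (what is proved, stated in full; the proofs are below) =====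
def Claim_equal_dvasugl : Prop := ∀ (string1 : String), Dom_dvasugl string1 → Pre_dvasugl string1 → Spec_dvasugl string1 (dvasugl string1)

-- ===== LEMMAS AND PROOFS =====

-- A's loop as a direct recursion on (last kept char, skip, remaining input), producing
-- the characters appended after the initial one.
def pvProcA (last : Char) (skip : Bool) : List Char → List Char
  | [] => []
  | c :: cs =>
    if c ≠ last ∨ c ∈ pvVowels then c :: pvProcA c false cs
    else if c = last ∧ c ∉ pvVowels ∧ skip = false then pvProcA last true cs
    else c :: pvProcA c false cs

-- A's whole result as a function of the character list.
def pvA : List Char → List Char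
  | [] => []
  | h :: t => h :: pvProcA h false t

-- the fold in the port computes pvProcA (accumulator reversed, nonempty)
theorem pvFoldA_eq (t : List Char) : ∀ (c : Char) (r : List Char) (skip : Bool),
    (t.foldl pvStepA (c :: r, skip)).1 = (pvProcA c skip t).reverse ++ c :: r := by
  induction t with
  | nil => intro c r skip; simp [pvProcA]
  | cons x xs ih =>
    intro c r skip
    simp only [List.foldl_cons, pvStepA, pvProcA]
    by_cases h1 : x ≠ c ∨ x ∈ pvVowels
    · simp [h1, ih]
    · push Not at h1
      obtain ⟨he, hnv⟩ := h1
      subst he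
      by_cases hs : skip = false
      · subst hs
        simp [hnv, ih]
      · simp [hnv, hs, ih]

-- when the rest does not start with `last`, skip is irrelevant and processing restarts
theorem pvProcA_restart (last : Char) (skip : Bool) (d : List Char)
    (hd : ∀ x, d.head? = some x → x ≠ last) : pvProcA last skip d = pvA d := by
  cases d with
  | nil => simp [pvProcA, pvA]
  | cons x xs =>
    have hx : x ≠ last := hd x rfl
    simp [pvProcA, pvA, hx]

-- a vowel run is copied through unchanged
theorem pvProcA_vowel (c : Char) (hv : c ∈ pvVowels) (k : ℕ) (d : List Char) :
    pvProcA c false (List.replicate k c ++ d) = List.replicate k c ++ pvProcA c false d := by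
  induction k with
  | zero => simp
  | succ n ih => simp [List.replicate_succ, pvProcA, hv, ih]

-- a consonant run: with skip=false the loop keeps ⌊k/2⌋ of the k remaining copies,
-- with skip=true it keeps ⌈k/2⌉; afterwards processing restarts on d (head ≠ c).
theorem pvProcA_cons (c : Char) (hv : c ∉ pvVowels) (k : ℕ) (d : List Char)
    (hd : ∀ x, d.head? = some x → x ≠ c) :
    pvProcA c false (List.replicate k c ++ d) = List.replicate (k / 2) c ++ pvA d ∧
    pvProcA c true (List.replicate k c ++ d) = List.replicate ((k + 1) / 2) c ++ pvA d := by
  induction k with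
  | zero =>
    constructor <;> simpa using pvProcA_restart c _ d hd
  | succ n ih =>
    constructor
    · have h : pvProcA c false (List.replicate (n + 1) c ++ d)
          = pvProcA c true (List.replicate n c ++ d) := by
        simp [List.replicate_succ, pvProcA, hv]
      rw [h, ih.2]
    · have h : pvProcA c true (List.replicate (n + 1) c ++ d)
          = c :: pvProcA c false (List.replicate n c ++ d) := by
        simp [List.replicate_succ, pvProcA, hv]
      rw [h, ih.1]
      have h2 : (n + 1 + 1) / 2 = n / 2 + 1 := by omega
      rw [h2, List.replicate_succ]
      simp

-- takeWhile (· = c) returns a replicate of its own length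
theorem pvTakeWhile_replicate (c : Char) (l : List Char) :
    l.takeWhile (· = c) = List.replicate (l.takeWhile (· = c)).length c := by
  induction l with
  | nil => simp
  | cons x xs ih =>
    by_cases h : x = c
    · subst h; simpa [List.takeWhile_cons, List.replicate_succ] using ih
    · simp [h]

-- head of dropWhile fails the predicate
theorem pvDropWhile_head (c : Char) (l : List Char) :
    ∀ x, (l.dropWhile (· = c)).head? = some x → x ≠ c := by
  induction l with
  | nil => simp
  | cons y ys ih =>
    by_cases h : y = c
    · simpa [List.dropWhile_cons, h] using ih
    · intro x hx
      simp [h] at hx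
      subst hx
      exact h

-- main equivalence on character lists, by strong induction (fuel = length)
theorem pvMainFuel : ∀ (n : ℕ) (l : List Char), l.length ≤ n → pvA l = pvRunGo l := by
  intro n
  induction n with
  | zero =>
    intro l hl
    have h0 : l = [] := List.eq_nil_of_length_eq_zero (Nat.le_zero.mp hl)
    subst h0
    rw [pvRunGo]
    rfl
  | succ n ih =>
    intro l hl
    cases l with
    | nil => rw [pvRunGo]; rfl
    | cons c cs =>
      obtain ⟨k, hk⟩ : ∃ k, cs.takeWhile (· = c) = List.replicate k c :=
        ⟨_, pvTakeWhile_replicate c cs⟩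
      have hklen : (cs.takeWhile (· = c)).length = k := by rw [hk]; simp
      have hsplit : cs = List.replicate k c ++ cs.dropWhile (· = c) := by
        conv_lhs => rw [← List.takeWhile_append_dropWhile (p := (· = c)) (l := cs)]
        rw [hk]
      have hd : ∀ x, (cs.dropWhile (· = c)).head? = some x → x ≠ c := pvDropWhile_head c cs
      have hdlen : (cs.dropWhile (· = c)).length ≤ n := by
        have h2 := List.length_dropWhile_le (· = c) cs
        simp only [List.length_cons] at hl
        omega
      have hIH : pvA (cs.dropWhile (· = c)) = pvRunGo (cs.dropWhile (· = c)) :=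
        ih _ hdlen
      have hrun : pvRunGo (c :: cs) =
          List.replicate (if c ∈ pvVowels then 1 + k else (1 + k + 1) / 2) c
            ++ pvRunGo (cs.dropWhile (· = c)) := by
        rw [pvRunGo, hklen]
      by_cases hv : c ∈ pvVowels
      · have hA : pvA (c :: cs) = c :: (List.replicate k c ++ pvA (cs.dropWhile (· = c))) := by
          rw [pvA]
          conv_lhs => rw [hsplit]
          rw [pvProcA_vowel c hv, pvProcA_restart c false _ hd]
        rw [hA, hrun, if_pos hv, ← hIH]
        have h1 : (1 + k) = k + 1 := by omega
        rw [h1, List.replicate_succ]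
        simp
      · have hA : pvA (c :: cs) = c :: (List.replicate (k / 2) c ++ pvA (cs.dropWhile (· = c))) := by
          rw [pvA]
          conv_lhs => rw [hsplit]
          rw [(pvProcA_cons c hv k _ hd).1]
        rw [hA, hrun, if_neg hv, ← hIH]
        have h1 : (1 + k + 1) / 2 = k / 2 + 1 := by omega
        rw [h1, List.replicate_succ]
        simp

theorem pvMain (l : List Char) : pvA l = pvRunGo l := pvMainFuel l.length l le_rfl

-- ===== VERDICT (by name: the statement is the Claim_ definition above) =====
theorem dvasugl_spec : Claim_equal_dvasugl := by
  intro s _ hpre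
  unfold Spec_dvasugl dvasugl dvasugl_alt
  cases hsl : s.toList with
  | nil =>
    exfalso
    apply hpre
    have := congrArg String.ofList hsl
    simpa using this
  | cons h t =>
    simp only
    rw [pvFoldA_eq]
    have h1 : ((pvProcA h false t).reverse ++ h :: ([] : List Char)).reverse
        = h :: pvProcA h false t := by simp
    rw [h1]
    have h2 := pvMain (h :: t)
    rw [pvA] at h2
    rw [h2]
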